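-- pv_equiv track=rewrite | github.com/Hemant-Jain-Author/Problem-Solving-in-Data-Structures-Algorithms-using-Python | IntroductoryChapters/IJArray.py | ArrayIndexMaxDiff
-- ===== SOURCE A (Python) =====
-- def ArrayIndexMaxDiff(arr):
--     size = len(arr)
--     maxDiff = -1
--     for i in range(size):
--         j = size - 1
--         while(j > i):
--             if arr[j] > arr[i] :
--                 maxDiff = max(maxDiff, j-i)
--                 break
--             j -= 1
--     return maxDiff
-- ===== SOURCE B (Python) =====
-- def ArrayIndexMaxDiff(arr):
--     n = len(arr)
--     # suffix maxima: suf[j] = max(arr[j:])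
--     suf = [0] * n
--     m = None
--     for j in range(n - 1, -1, -1):
--         if m is None or arr[j] > m:
--             m = arr[j]
--         suf[j] = m
--     # two-pointer scan
--     ans = -1
--     i = j = 0
--     while i < n and j < n:
--         if suf[j] > arr[i]:
--             ans = max(ans, j - i)
--             j += 1
--         else:
--             i += 1
--     return ans
-- ===== Notes on version B (the rewrite author's own statement) =====
-- stated objective: faster
-- what changed: Replaces the per-index backward inner scan (O(n^2)) by a suffix-maximum array plus a single two-pointer sweep (O(n)).
import Mathlib
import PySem

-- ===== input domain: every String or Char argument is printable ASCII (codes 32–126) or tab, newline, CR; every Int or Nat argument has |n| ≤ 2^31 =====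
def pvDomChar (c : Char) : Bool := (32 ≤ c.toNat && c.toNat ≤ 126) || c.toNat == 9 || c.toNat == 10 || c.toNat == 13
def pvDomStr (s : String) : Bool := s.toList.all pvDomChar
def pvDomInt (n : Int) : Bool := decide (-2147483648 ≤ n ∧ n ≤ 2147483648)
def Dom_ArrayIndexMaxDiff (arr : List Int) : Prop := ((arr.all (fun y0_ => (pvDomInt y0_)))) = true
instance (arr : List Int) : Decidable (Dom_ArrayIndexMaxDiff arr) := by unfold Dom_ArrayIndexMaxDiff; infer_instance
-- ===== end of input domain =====

-- B replaces A's per-index backward inner scan by a suffix-maximum array and one two-pointer sweep (asymptotically faster).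

-- ===== PORT A =====
-- inner 'while j > i: if arr[j] > arr[i]: maxDiff = max(maxDiff, j-i); break; j -= 1'
def pvInnerA (arr : List Int) (i : Nat) (j : Nat) (maxDiff : Int) : Int :=
  if j > i then
    if arr.getD i 0 < arr.getD j 0 then max maxDiff ((j : Int) - (i : Int))
    else pvInnerA arr i (j - 1) maxDiff
  else maxDiff
termination_by j
decreasing_by omega

def ArrayIndexMaxDiff (arr : List Int) : Int :=
  (List.range arr.length).foldl (fun maxDiff i => pvInnerA arr i (arr.length - 1) maxDiff) (-1)

-- ===== PORT B =====
-- backward pass building the suffix-maximum list: (pvSuf l)[j] = max l[j:]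
def pvSuf : List Int → List Int
  | [] => []
  | x :: xs =>
    match pvSuf xs with
    | [] => [x]
    | m :: rest => max x m :: m :: rest

-- 'while i < n and j < n: if suf[j] > arr[i]: ans = max(ans, j-i); j += 1 else: i += 1'
def pvScan (arr suf : List Int) (n i j : Nat) (ans : Int) : Int :=
  if i < n ∧ j < n then
    if arr.getD i 0 < suf.getD j 0 then pvScan arr suf n i (j + 1) (max ans ((j : Int) - (i : Int)))
    else pvScan arr suf n (i + 1) j ans
  else ans
termination_by (n - i) + (n - j)
decreasing_by all_goals omega

def ArrayIndexMaxDiff_alt (arr : List Int) : Int :=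
  pvScan arr (pvSuf arr) arr.length 0 0 (-1)

-- ===== PRECONDITION & SPEC =====
def Spec_ArrayIndexMaxDiff (arr : List Int) (out : Int) : Prop := out = ArrayIndexMaxDiff_alt arr
instance (arr : List Int) (out : Int) : Decidable (Spec_ArrayIndexMaxDiff arr out) := by unfold Spec_ArrayIndexMaxDiff; infer_instance

-- ===== CLAIM (what is proved, stated in full; the proofs are below) =====
def Claim_equal_ArrayIndexMaxDiff : Prop := ∀ (arr : List Int), Dom_ArrayIndexMaxDiff arr → Spec_ArrayIndexMaxDiff arr (ArrayIndexMaxDiff arr)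

-- ===== LEMMAS AND PROOFS =====

-- a valid pair: indices p < q with arr[p] < arr[q]
def pvValid (arr : List Int) (p q : Nat) : Prop :=
  p < q ∧ q < arr.length ∧ arr.getD p 0 < arr.getD q 0

-- ---- suffix-max lemmas ----
theorem pvSuf_length (l : List Int) : (pvSuf l).length = l.length := by
  induction l with
  | nil => rfl
  | cons x xs ih =>
    unfold pvSuf
    cases h : pvSuf xs with
    | nil => simp_all
    | cons m rest => simp_all

theorem pvSuf_ge (l : List Int) : ∀ j k, j ≤ k → k < l.length →
    l.getD k 0 ≤ (pvSuf l).getD j 0 := by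
  induction l with
  | nil => intro j k _ h; simp at h
  | cons x xs ih =>
    intro j k hjk hk
    unfold pvSuf
    cases h : pvSuf xs with
    | nil =>
      have hxs : xs = [] := by
        have := pvSuf_length xs; rw [h] at this; exact List.eq_nil_of_length_eq_zero this.symm
      subst hxs
      have hk0 : k = 0 := by simp at hk; omega
      have hj0 : j = 0 := by omega
      subst hk0; subst hj0; simp
    | cons m rest =>
      cases j with
      | zero =>
        cases k with
        | zero => simp
        | succ k' =>
          have h1 : xs.getD k' 0 ≤ (pvSuf xs).getD 0 0 := ih 0 k' (Nat.zero_le _) (by simpa using hk)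
          rw [h] at h1
          simp only [List.getD_cons_zero] at h1
          simp only [List.getD_cons_succ, List.getD_cons_zero]
          exact le_trans h1 (le_max_right _ _)
      | succ j' =>
        cases k with
        | zero => omega
        | succ k' =>
          have h1 : xs.getD k' 0 ≤ (pvSuf xs).getD j' 0 := ih j' k' (by omega) (by simpa using hk)
          rw [h] at h1
          simpa using h1

theorem pvSuf_attained (l : List Int) : ∀ j, j < l.length →
    ∃ k, j ≤ k ∧ k < l.length ∧ (pvSuf l).getD j 0 = l.getD k 0 := by
  induction l with
  | nil => intro j h; simp at h
  | cons x xs ih =>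
    intro j hj
    unfold pvSuf
    cases h : pvSuf xs with
    | nil =>
      have : xs = [] := by
        have := pvSuf_length xs; rw [h] at this; exact List.eq_nil_of_length_eq_zero this.symm
      subst this
      exact ⟨0, by simp_all⟩
    | cons m rest =>
      have hxs : 0 < xs.length := by
        have := pvSuf_length xs; rw [h] at this; simp at this; omega
      cases j with
      | zero =>
        rcases ih 0 hxs with ⟨k, _, hk2, hk3⟩
        rw [h] at hk3
        simp at hk3
        by_cases hxm : m ≤ x
        · exact ⟨0, by simp [max_eq_left hxm]⟩
        · refine ⟨k + 1, by omega, by simpa using hk2, ?_⟩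
          simp only [List.getD_cons_zero, List.getD_cons_succ]
          rw [max_eq_right (by omega : x ≤ m)]
          exact hk3
      | succ j' =>
        rcases ih j' (by simpa using hj) with ⟨k, hk1, hk2, hk3⟩
        rw [h] at hk3
        exact ⟨k + 1, by omega, by simpa using hk2, by simpa using hk3⟩

-- ---- two-pointer scan: invariant-based characterisation ----
theorem pvScan_correct (arr : List Int) : ∀ (fuel i j : Nat) (ans : Int),
    (arr.length - i) + (arr.length - j) ≤ fuel →
    (∀ p q, pvValid arr p q → (p < i → q < j) ∧ (q < j → (q : Int) - (p : Int) ≤ ans)) →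
    (-1 ≤ ans) →
    (ans = -1 ∨ ∃ p q, pvValid arr p q ∧ ans ≤ (q : Int) - (p : Int)) →
    (∀ p q, pvValid arr p q → (q : Int) - (p : Int) ≤ pvScan arr (pvSuf arr) arr.length i j ans) ∧
    (-1 ≤ pvScan arr (pvSuf arr) arr.length i j ans) ∧
    (pvScan arr (pvSuf arr) arr.length i j ans = -1 ∨
      ∃ p q, pvValid arr p q ∧ pvScan arr (pvSuf arr) arr.length i j ans ≤ (q : Int) - (p : Int)) := by
  intro fuel
  induction fuel with
  | zero =>
    intro i j ans hfuel hI hb hopt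
    rw [pvScan]
    have hcond : ¬ (i < arr.length ∧ j < arr.length) := by omega
    rw [if_neg hcond]
    refine ⟨?_, hb, hopt⟩
    intro p q hpq
    have h0 := hI p q hpq
    obtain ⟨h1, h2, _⟩ := hpq
    have hni : arr.length ≤ i := by clear h0 hI hb hopt; omega
    exact h0.2 (h0.1 (by clear h0 hI hb hopt hfuel; omega))
  | succ f ih =>
    intro i j ans hfuel hI hb hopt
    rw [pvScan]
    by_cases hcond : i < arr.length ∧ j < arr.length
    · rw [if_pos hcond]
      by_cases hlt : arr.getD i 0 < (pvSuf arr).getD j 0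
      · rw [if_pos hlt]
        apply ih
        · omega
        · -- invariant preserved, condition true branch
          intro p q hpq
          have h0 := hI p q hpq
          constructor
          · intro hp; exact Nat.lt_succ_of_lt (h0.1 hp)
          · intro hq
            by_cases hqj : q < j
            · exact le_trans (h0.2 hqj) (le_max_left _ _)
            · have hqeq : q = j := by omega
              subst hqeq
              have hip : i ≤ p := by
                by_contra hc
                exact absurd (h0.1 (by omega)) (by omega)
              have : (q : Int) - (p : Int) ≤ (q : Int) - (i : Int) := by
                have : (i : Int) ≤ (p : Int) := by exact_mod_cast hip
                omega
              exact le_trans this (le_max_right _ _)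
        · exact le_trans hb (le_max_left _ _)
        · -- optimality preserved
          by_cases hle : (j : Int) - (i : Int) ≤ ans
          · rw [max_eq_left hle]; exact hopt
          · have hmax : max ans ((j : Int) - (i : Int)) = (j : Int) - (i : Int) := max_eq_right (by omega)
            rw [hmax]
            have hij : i ≤ j := by
              by_contra hc
              have : (j : Int) - (i : Int) < 0 := by
                have : (j : Int) < (i : Int) := by exact_mod_cast Nat.lt_of_not_le (by omega)
                omega
              omega
            rcases pvSuf_attained arr j hcond.2 with ⟨k, hk1, hk2, hk3⟩
            have harrk : arr.getD i 0 < arr.getD k 0 := by rw [hk3] at hlt; exact hlt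
            have hik : i < k := by
              rcases Nat.lt_or_ge i k with h | h
              · exact h
              · have hki : k ≤ i := h
                have : k = i ∨ k < i := by omega
                rcases this with h | h
                · subst h; omega
                · omega
            right
            exact ⟨i, k, ⟨hik, hk2, harrk⟩, by
              have : (j : Int) ≤ (k : Int) := by exact_mod_cast hk1
              omega⟩
      · rw [if_neg hlt]
        apply ih
        · omega
        · intro p q hpq
          have h0 := hI p q hpq
          constructor
          · intro hp
            by_cases hpi : p < i
            · exact h0.1 hpi
            · have hpeq : p = i := by omega
              subst hpeq
              by_contra hc
              have hjq : j ≤ q := by omega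
              have := pvSuf_ge arr j q hjq hpq.2.1
              have := hpq.2.2
              omega
          · exact h0.2
        · exact hb
        · exact hopt
    · rw [if_neg hcond]
      refine ⟨?_, hb, hopt⟩
      intro p q hpq
      have h0 := hI p q hpq
      obtain ⟨h1, h2, _⟩ := hpq
      have hor : arr.length ≤ i ∨ arr.length ≤ j := by omega
      rcases hor with h | h
      · exact h0.2 (h0.1 (by omega))
      · exact h0.2 (by omega)

-- ---- A-side lemmas ----
theorem pvInnerA_ge (arr : List Int) (i : Nat) : ∀ (j : Nat) (m : Int), m ≤ pvInnerA arr i j m := by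
  intro j
  induction j using Nat.strong_induction_on with
  | _ j ih =>
    intro m
    rw [pvInnerA]
    by_cases h1 : j > i
    · rw [if_pos h1]
      by_cases h2 : arr.getD i 0 < arr.getD j 0
      · rw [if_pos h2]; exact le_max_left _ _
      · rw [if_neg h2]; exact ih (j - 1) (by omega) m
    · rw [if_neg h1]

theorem pvInnerA_complete (arr : List Int) (i : Nat) : ∀ (j : Nat) (m : Int) (q : Nat),
    i < q → q ≤ j → arr.getD i 0 < arr.getD q 0 →
    (q : Int) - (i : Int) ≤ pvInnerA arr i j m := by
  intro j
  induction j using Nat.strong_induction_on with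
  | _ j ih =>
    intro m q hiq hqj harr
    rw [pvInnerA]
    have h1 : j > i := by omega
    rw [if_pos h1]
    by_cases h2 : arr.getD i 0 < arr.getD j 0
    · rw [if_pos h2]
      have : (q : Int) ≤ (j : Int) := by exact_mod_cast hqj
      have : (q : Int) - (i : Int) ≤ (j : Int) - (i : Int) := by omega
      exact le_trans this (le_max_right _ _)
    · rw [if_neg h2]
      have hqj' : q ≤ j - 1 := by
        rcases Nat.lt_or_ge q j with h | h
        · omega
        · have : q = j := by omega
          subst this; exact absurd harr h2
      exact ih (j - 1) (by omega) m q hiq hqj' harr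

theorem pvInnerA_opt (arr : List Int) (i : Nat) : ∀ (j : Nat) (m : Int), j < arr.length →
    pvInnerA arr i j m = m ∨
    ∃ q, i < q ∧ q < arr.length ∧ arr.getD i 0 < arr.getD q 0 ∧
      pvInnerA arr i j m = (q : Int) - (i : Int) := by
  intro j
  induction j using Nat.strong_induction_on with
  | _ j ih =>
    intro m hj
    rw [pvInnerA]
    by_cases h1 : j > i
    · rw [if_pos h1]
      by_cases h2 : arr.getD i 0 < arr.getD j 0
      · rw [if_pos h2]
        by_cases h3 : (j : Int) - (i : Int) ≤ m
        · left; exact max_eq_left h3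
        · right
          exact ⟨j, h1, hj, h2, max_eq_right (by omega)⟩
      · rw [if_neg h2]
        exact ih (j - 1) (by omega) m (by omega)
    · rw [if_neg h1]; left; rfl

-- fold over the outer range: result ≥ accumulator
theorem pvFold_ge (arr : List Int) : ∀ (L : List Nat) (acc : Int),
    acc ≤ L.foldl (fun maxDiff i => pvInnerA arr i (arr.length - 1) maxDiff) acc := by
  intro L
  induction L with
  | nil => intro acc; simp
  | cons x xs ih =>
    intro acc
    simp only [List.foldl_cons]
    exact le_trans (pvInnerA_ge arr x (arr.length - 1) acc) (ih _)

theorem pvFold_complete (arr : List Int) : ∀ (L : List Nat) (acc : Int) (p q : Nat),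
    p ∈ L → pvValid arr p q →
    (q : Int) - (p : Int) ≤ L.foldl (fun maxDiff i => pvInnerA arr i (arr.length - 1) maxDiff) acc := by
  intro L
  induction L with
  | nil => intro acc p q hp; simp at hp
  | cons x xs ih =>
    intro acc p q hp hpq
    simp only [List.foldl_cons]
    rcases List.mem_cons.mp hp with h | h
    · subst h
      have h1 : (q : Int) - (p : Int) ≤ pvInnerA arr p (arr.length - 1) acc :=
        pvInnerA_complete arr p (arr.length - 1) acc q hpq.1 (by have := hpq.2.1; omega) hpq.2.2
      exact le_trans h1 (pvFold_ge arr xs _)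
    · exact ih _ p q h hpq

theorem pvFold_opt (arr : List Int) (hne : 0 < arr.length) : ∀ (L : List Nat) (acc : Int),
    (acc = -1 ∨ ∃ p q, pvValid arr p q ∧ acc ≤ (q : Int) - (p : Int)) →
    (L.foldl (fun maxDiff i => pvInnerA arr i (arr.length - 1) maxDiff) acc = -1 ∨
      ∃ p q, pvValid arr p q ∧
        L.foldl (fun maxDiff i => pvInnerA arr i (arr.length - 1) maxDiff) acc ≤ (q : Int) - (p : Int)) := by
  intro L
  induction L with
  | nil => intro acc h; simpa using h
  | cons x xs ih =>
    intro acc hacc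
    simp only [List.foldl_cons]
    apply ih
    rcases pvInnerA_opt arr x (arr.length - 1) acc (by omega) with h | ⟨q, hq1, hq2, hq3, hq4⟩
    · rw [h]; exact hacc
    · right
      exact ⟨x, q, ⟨hq1, hq2, hq3⟩, le_of_eq hq4⟩

theorem pvFold_bound (arr : List Int) : ∀ (L : List Nat) (acc : Int), -1 ≤ acc →
    -1 ≤ L.foldl (fun maxDiff i => pvInnerA arr i (arr.length - 1) maxDiff) acc := by
  intro L acc h
  exact le_trans h (pvFold_ge arr L acc)

-- ===== VERDICT (by name: the statement is the Claim_ definition above) =====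
theorem ArrayIndexMaxDiff_spec : Claim_equal_ArrayIndexMaxDiff := by
  intro arr _
  unfold Spec_ArrayIndexMaxDiff ArrayIndexMaxDiff ArrayIndexMaxDiff_alt
  obtain ⟨hBcomp, hBbd, hBopt⟩ := pvScan_correct arr (arr.length + arr.length) 0 0 (-1)
    (by omega)
    (by intro p q _; constructor <;> (intro h; omega)) (le_refl _) (Or.inl rfl)
  have hAbd : (-1 : Int) ≤
      (List.range arr.length).foldl (fun maxDiff i => pvInnerA arr i (arr.length - 1) maxDiff) (-1) :=
    pvFold_bound arr _ _ (le_refl _)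
  by_cases hne : 0 < arr.length
  · have hAcomp : ∀ p q, pvValid arr p q → (q : Int) - (p : Int) ≤
        (List.range arr.length).foldl (fun maxDiff i => pvInnerA arr i (arr.length - 1) maxDiff) (-1) := by
      intro p q hpq
      exact pvFold_complete arr _ (-1) p q
        (List.mem_range.mpr (by have := hpq.1; have := hpq.2.1; omega)) hpq
    have hAopt := pvFold_opt arr hne (List.range arr.length) (-1) (Or.inl rfl)
    apply le_antisymm
    · rcases hAopt with h | ⟨p, q, hpq, hle⟩
      · rw [h]; exact hBbd
      · exact le_trans hle (hBcomp p q hpq)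
    · rcases hBopt with h | ⟨p, q, hpq, hle⟩
      · rw [h]; exact hAbd
      · exact le_trans hle (hAcomp p q hpq)
  · have harr : arr = [] := by
      cases arr with
      | nil => rfl
      | cons x xs => simp at hne
    subst harr
    rw [pvScan]
    simp
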